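-- pv_equiv track=rewrite | github.com/protolabo/picky | src/backend/api/pyramid_ocr_from_xml.py | annotate_cells_with_merge_info
-- ===== SOURCE A (Python) =====
-- from collections import defaultdict
--
-- def detect_vertical_merges(rows):
--         """
--         Marque les cellules fusionnées verticalement à l’aide d’un balayage horizontal
--         au centre de chaque ligne. Retourne un dict : cell_index -> nb de lignes traversées.
--         """
--         """
--         Détecte les fusions verticales de cellules
--         @param rows: Liste de lignes de cellules
--         @return: Dictionnaire associant l'index de cellule au nombre de lignes traversées
--
--         Méthode:
--         1. Calcule le centre vertical de chaque ligne
--         2. Pour chaque cellule, compte le nombre de lignes qu'elle traverse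
--         """
--         all_cells = [cell for row in rows for cell in row]
--         row_y_centers = [
--             (min(y for (_, y, _, _) in row) + max(y + h for (_, y, _, h) in row)) // 2
--             for row in rows if row
--         ]
--
--         cell_crossings = defaultdict(int)
--         for i, (x, y, w, h) in enumerate(all_cells):
--             for line_y in row_y_centers:
--                 if y <= line_y <= y + h:
--                     cell_crossings[i] += 1
--         return cell_crossings
--
-- def annotate_cells_with_merge_info(rows):
--         """
--         Renvoie une version de `rows` où chaque cellule est annotée avec le nombre de lignes qu'elle couvre.
--         """
--         """
--         Ajoute l'information de fusion aux cellules
--         @param rows: Liste de lignes de cellules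
--         @return: Liste de lignes avec cellules annotées (cellule, nombre_lignes)
--
--         Processus:
--         1. Obtient les informations de fusion via detect_vertical_merges
--         2. Annote chaque cellule avec son nombre de lignes
--         """
--         all_cells = [cell for row in rows for cell in row]
--         crossings = detect_vertical_merges(rows)
--
--         annotated = []
--         i = 0
--         for row in rows:
--             new_row = []
--             for _ in row:
--                 merge = crossings.get(i, 1)
--                 new_row.append((all_cells[i], merge))
--                 i += 1
--             annotated.append(new_row)
--         return annotated
-- ===== SOURCE B (Python) =====
-- def _bisect(centers, go_right, lo, hi):
--     # generic binary search: first index in [lo, hi) where go_right fails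
--     while lo < hi:
--         mid = (lo + hi) // 2
--         if go_right(centers[mid]):
--             lo = mid + 1
--         else:
--             hi = mid
--     return lo
--
--
-- def annotate_cells_with_merge_info(rows):
--     centers = sorted(
--         (min(y for (_, y, _, _) in row) + max(y + h for (_, y, _, h) in row)) // 2
--         for row in rows
--         if row
--     )
--     n = len(centers)
--     annotated = []
--     for row in rows:
--         new_row = []
--         for (x, y, w, h) in row:
--             lo = _bisect(centers, lambda v: v < y, 0, n)
--             hi = _bisect(centers, lambda v: v <= y + h, 0, n)
--             new_row.append(((x, y, w, h), hi - lo if hi > lo else 1))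
--         annotated.append(new_row)
--     return annotated
-- ===== Notes on version B (the rewrite author's own statement) =====
-- stated objective: faster
-- what changed: A counts, for every cell, the row centers it spans by scanning the whole center list (and threads a global cell index through a defaultdict); B sorts the centers once and counts the centers inside each cell's [y, y+h] with two binary searches, annotating rows directly.
import Mathlib
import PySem

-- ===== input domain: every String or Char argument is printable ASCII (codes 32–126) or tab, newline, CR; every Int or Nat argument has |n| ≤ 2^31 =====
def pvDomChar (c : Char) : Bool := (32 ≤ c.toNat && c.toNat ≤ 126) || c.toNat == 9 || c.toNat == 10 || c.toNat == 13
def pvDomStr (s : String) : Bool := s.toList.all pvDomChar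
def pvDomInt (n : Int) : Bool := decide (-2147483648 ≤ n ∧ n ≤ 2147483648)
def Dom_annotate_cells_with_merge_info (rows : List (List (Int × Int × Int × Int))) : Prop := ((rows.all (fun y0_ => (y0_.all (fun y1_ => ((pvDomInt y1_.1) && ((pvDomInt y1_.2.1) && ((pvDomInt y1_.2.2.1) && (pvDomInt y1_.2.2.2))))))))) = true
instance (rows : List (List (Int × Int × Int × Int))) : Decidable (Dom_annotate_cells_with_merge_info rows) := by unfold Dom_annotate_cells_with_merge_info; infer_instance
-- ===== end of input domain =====

-- B replaces A's quadratic cells×rows scan by sorting the row centers once and counting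
-- the centers inside each cell's [y, y+h] span with two binary searches (objective: faster).

-- ===== PORT A =====
-- helper of A: detect_vertical_merges (transliterated)
def detect_vertical_merges (rows : List (List (Int × Int × Int × Int))) : PySem.Dict Int Int :=
  let all_cells := rows.foldl (fun acc row => acc ++ row) []
  let row_y_centers := (rows.filter (fun row => !row.isEmpty)).map (fun row =>
    PySem.Int.floordiv
      (((PySem.List.min? (row.map (fun c => c.2.1)) (fun v => v)).getD 0) +
       ((PySem.List.max? (row.map (fun c => c.2.1 + c.2.2.2)) (fun v => v)).getD 0)) 2)
      -- `.getD 0` is unreachable: the filter keeps only non-empty rows, so min?/max? are `some`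
  (PySem.List.enumerate all_cells).foldl (fun d p =>
    row_y_centers.foldl (fun d ly =>
      if p.2.2.1 ≤ ly ∧ ly ≤ p.2.2.1 + p.2.2.2.2 then d.modify p.1 0 (· + 1) else d) d)
    PySem.Dict.empty

def annotate_cells_with_merge_info (rows : List (List (Int × Int × Int × Int))) : List (List ((Int × Int × Int × Int) × Int)) :=
  let all_cells := rows.foldl (fun acc row => acc ++ row) []
  let crossings := detect_vertical_merges rows
  -- the `i`-indexed double loop; `all_cells[i]` is always in range, so pyGetD with a dummy default is exact
  let st := rows.foldl
    (fun (st : List (List ((Int × Int × Int × Int) × Int)) × Int) row =>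
      let inner := row.foldl
        (fun (st2 : List ((Int × Int × Int × Int) × Int) × Int) _ =>
          let merge := crossings.getD st2.2 1
          (st2.1 ++ [(PySem.List.pyGetD all_cells st2.2 (0, 0, 0, 0), merge)], st2.2 + 1))
        ([], st.2)
      (st.1 ++ [inner.1], inner.2))
    ([], 0)
  st.1

-- ===== PORT B =====
-- helper of B: _bisect (textbook binary search, transliterated; lo/hi are list indices, always ≥ 0,
-- and centers[mid] is always in range, so Nat indices and getD with a dummy default are exact)
-- (the `while lo < hi` loop, with the interval width hi - lo as structural fuel)
def pvBisectGo : Nat → List Int → (Int → Bool) → Nat → Nat → Nat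
  | 0, _, _, lo, _ => lo
  | fuel + 1, centers, go_right, lo, hi =>
    if lo < hi then
      let mid := (lo + hi) / 2
      if go_right (centers.getD mid 0) then pvBisectGo fuel centers go_right (mid + 1) hi
      else pvBisectGo fuel centers go_right lo mid
    else lo

def pvBisect (centers : List Int) (go_right : Int → Bool) (lo hi : Nat) : Nat :=
  pvBisectGo (hi - lo) centers go_right lo hi

def annotate_cells_with_merge_info_alt (rows : List (List (Int × Int × Int × Int))) : List (List ((Int × Int × Int × Int) × Int)) :=
  let centers := PySem.List.sorted
    ((rows.filter (fun row => !row.isEmpty)).map (fun row =>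
      PySem.Int.floordiv
        (((PySem.List.min? (row.map (fun c => c.2.1)) (fun v => v)).getD 0) +
         ((PySem.List.max? (row.map (fun c => c.2.1 + c.2.2.2)) (fun v => v)).getD 0)) 2))
    (fun v => v)
  let n := centers.length
  rows.foldl (fun acc row =>
    acc ++ [row.foldl (fun new_row c =>
      let lo := pvBisect centers (fun v => v < c.2.1) 0 n
      let hi := pvBisect centers (fun v => v ≤ c.2.1 + c.2.2.2) 0 n
      new_row ++ [(c, if lo < hi then (hi : Int) - (lo : Int) else 1)]) []]) []

-- ===== PRECONDITION & SPEC =====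
def Spec_annotate_cells_with_merge_info (rows : List (List (Int × Int × Int × Int))) (out : List (List ((Int × Int × Int × Int) × Int))) : Prop := out = annotate_cells_with_merge_info_alt rows
instance (rows : List (List (Int × Int × Int × Int))) (out : List (List ((Int × Int × Int × Int) × Int))) : Decidable (Spec_annotate_cells_with_merge_info rows out) := by unfold Spec_annotate_cells_with_merge_info; infer_instance

-- ===== CLAIM (what is proved, stated in full; the proofs are below) =====
def Claim_equal_annotate_cells_with_merge_info : Prop := ∀ (rows : List (List (Int × Int × Int × Int))), Dom_annotate_cells_with_merge_info rows → Spec_annotate_cells_with_merge_info rows (annotate_cells_with_merge_info rows)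

-- ===== LEMMAS AND PROOFS =====

-- the centers list both programs compute
def pvCenters (rows : List (List (Int × Int × Int × Int))) : List Int :=
  (rows.filter (fun row => !row.isEmpty)).map (fun row =>
    PySem.Int.floordiv
      (((PySem.List.min? (row.map (fun c => c.2.1)) (fun v => v)).getD 0) +
       ((PySem.List.max? (row.map (fun c => c.2.1 + c.2.2.2)) (fun v => v)).getD 0)) 2)

-- number of row centers a cell spans
def pvK (cs : List Int) (c : Int × Int × Int × Int) : Nat :=
  cs.countP (fun ly => decide (c.2.1 ≤ ly ∧ ly ≤ c.2.1 + c.2.2.2))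

-- the common value both programs attach to a cell
def pvF (cs : List Int) (c : Int × Int × Int × Int) : (Int × Int × Int × Int) × Int :=
  (c, if pvK cs c = 0 then 1 else (pvK cs c : Int))

-- ---- binary-search lemmas ----
lemma pvBisectGo_eq (fuel : Nat) : ∀ (s : List Int) (t : Int → Bool) (lo hi k : Nat),
    hi - lo ≤ fuel → lo ≤ k → k ≤ hi →
    (∀ i, lo ≤ i → i < k → t (s.getD i 0) = true) →
    (∀ i, k ≤ i → i < hi → t (s.getD i 0) = false) →
    pvBisectGo fuel s t lo hi = k := by
  induction fuel with
  | zero =>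
    intro s t lo hi k hf hlo hhi _ _
    simp only [pvBisectGo]
    omega
  | succ f ih =>
    intro s t lo hi k hf hlo hhi h1 h2
    simp only [pvBisectGo]
    by_cases h : lo < hi
    · simp only [if_pos h]
      by_cases ht : t (s.getD ((lo + hi) / 2) 0) = true
      · rw [if_pos (by simpa [List.getD_eq_getElem?_getD] using ht)]
        have hk : (lo + hi) / 2 < k := by
          by_contra hc
          have hx := h2 ((lo + hi) / 2) (by omega) (by omega)
          rw [List.getD_eq_getElem?_getD] at hx
          simp [hx] at ht
        exact ih s t _ hi k (by omega) (by omega) hhi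
          (fun i hi1 hi2 => h1 i (by omega) hi2) h2
      · simp only [Bool.not_eq_true] at ht
        rw [if_neg (by simpa [List.getD_eq_getElem?_getD] using ht)]
        have hk : k ≤ (lo + hi) / 2 := by
          by_contra hc
          have hx := h1 ((lo + hi) / 2) (by omega) (by omega)
          rw [List.getD_eq_getElem?_getD] at hx
          simp [hx] at ht
        exact ih s t lo _ k (by omega) hlo (by omega) h1
          (fun i hi1 hi2 => h2 i hi1 (by omega))
    · simp only [if_neg h]
      omega

-- if s is sorted and a downward-closed predicate fails at i, it fails from i on, so countP ≤ i
lemma countP_le_of_false (s : List Int) (p : Int → Bool) (i : Nat) (hil : i < s.length)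
    (hf : p s[i] = false) (hs : s.Pairwise (· ≤ ·))
    (hdc : ∀ v w : Int, v ≤ w → p w = true → p v = true) : s.countP p ≤ i := by
  have hdrop : (s.drop i).countP p = 0 := by
    rw [List.countP_eq_zero]
    intro a ha
    obtain ⟨j, hj, rfl⟩ := List.mem_iff_getElem.mp ha
    rw [List.getElem_drop]
    intro hpa
    have hij : i + j < s.length := by
      have h' := hj; rw [List.length_drop] at h'; omega
    have hle : s[i] ≤ s[i + j] := by
      rcases Nat.eq_zero_or_pos j with h0 | hpos
      · subst h0; simp
      · exact (List.pairwise_iff_getElem.mp hs) i (i + j) hil hij (by omega)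
    have := hdc _ _ hle hpa
    simp [this] at hf
  calc s.countP p = (s.take i).countP p + (s.drop i).countP p := by
        rw [← List.countP_append, List.take_append_drop]
    _ ≤ i := by
        rw [hdrop]
        simpa using le_trans List.countP_le_length (by simp)

-- if it holds at i, it holds up to i, so countP ≥ i + 1
lemma le_countP_of_true (s : List Int) (p : Int → Bool) (i : Nat) (hil : i < s.length)
    (ht : p s[i] = true) (hs : s.Pairwise (· ≤ ·))
    (hdc : ∀ v w : Int, v ≤ w → p w = true → p v = true) : i + 1 ≤ s.countP p := by
  have htake : (s.take (i + 1)).countP p = (s.take (i + 1)).length := by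
    rw [List.countP_eq_length]
    intro a ha
    obtain ⟨j, hj, rfl⟩ := List.mem_iff_getElem.mp ha
    have hji : j < i + 1 := by
      have := hj; simp only [List.length_take] at this; omega
    rw [List.getElem_take]
    rcases Nat.eq_or_lt_of_le (Nat.le_of_lt_succ hji) with heq | hlt
    · subst heq; exact ht
    · have : s[j] ≤ s[i] := (List.pairwise_iff_getElem.mp hs) j i (by omega) hil hlt
      exact hdc _ _ this ht
  have hlen : (s.take (i + 1)).length = i + 1 := by simp; omega
  calc i + 1 = (s.take (i + 1)).countP p := by rw [htake, hlen]
    _ ≤ s.countP p := by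
        conv_rhs => rw [← List.take_append_drop (i + 1) s]
        rw [List.countP_append]; omega

-- on a sorted list, counting a downward-closed predicate: elements before the count satisfy it
lemma countP_sorted_lt (s : List Int) (p : Int → Bool)
    (hs : s.Pairwise (· ≤ ·)) (hdc : ∀ v w : Int, v ≤ w → p w = true → p v = true) :
    ∀ i, i < s.countP p → p (s.getD i 0) = true := by
  intro i hi
  have hil : i < s.length := lt_of_lt_of_le hi List.countP_le_length
  by_contra hf
  simp only [Bool.not_eq_true] at hf
  rw [List.getD_eq_getElem s 0 hil] at hf
  have hle : s.countP p ≤ i := countP_le_of_false s p i hil hf hs hdc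
  omega

lemma countP_sorted_ge (s : List Int) (p : Int → Bool)
    (hs : s.Pairwise (· ≤ ·)) (hdc : ∀ v w : Int, v ≤ w → p w = true → p v = true) :
    ∀ i, s.countP p ≤ i → i < s.length → p (s.getD i 0) = false := by
  intro i hi hil
  by_contra hf
  simp only [Bool.not_eq_false] at hf
  rw [List.getD_eq_getElem s 0 hil] at hf
  have hge : i + 1 ≤ s.countP p := le_countP_of_true s p i hil hf hs hdc
  omega

lemma pvBisect_countP (s : List Int) (t : Int → Bool)
    (hs : s.Pairwise (· ≤ ·)) (hdc : ∀ v w : Int, v ≤ w → t w = true → t v = true) :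
    pvBisect s t 0 s.length = s.countP t := by
  refine pvBisectGo_eq (s.length - 0) s t 0 s.length (s.countP t) (by omega) (by omega)
    (List.countP_le_length) (fun i _ h2 => countP_sorted_lt s t hs hdc i h2)
    (fun i h1 h2 => countP_sorted_ge s t hs hdc i h1 h2)

-- arithmetic of the two counts
lemma counts_split (cs : List Int) (y v : Int) (h : y ≤ v) :
    cs.countP (fun ly => decide (ly ≤ v))
      = cs.countP (fun ly => decide (ly < y)) + cs.countP (fun ly => decide (y ≤ ly ∧ ly ≤ v)) := by
  induction cs with
  | nil => simp
  | cons a t ih =>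
    simp only [List.countP_cons, ih, decide_eq_true_eq]
    split_ifs <;> omega

-- ---- dict-building lemmas (A's inner and outer loops) ----
lemma innerFold_getD (cs : List Int) (c : Int × Int × Int × Int) (i j : Int) (d : PySem.Dict Int Int) :
    (cs.foldl (fun d ly => if c.2.1 ≤ ly ∧ ly ≤ c.2.1 + c.2.2.2 then d.modify i 0 (· + 1) else d) d).getD j 0
      = if j = i then d.getD j 0 + (pvK cs c : Int) else d.getD j 0 := by
  unfold pvK
  induction cs generalizing d with
  | nil => simp
  | cons a t ih =>
    simp only [List.foldl_cons, List.countP_cons]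
    by_cases hpa : c.2.1 ≤ a ∧ a ≤ c.2.1 + c.2.2.2
    · rw [if_pos hpa, ih]
      by_cases hj : j = i
      · subst hj
        simp [hpa]
        ring
      · simp [hj, PySem.Dict.getD_modify_of_ne d 0 _ hj]
    · rw [if_neg hpa, ih]
      by_cases hj : j = i <;> simp [hj, hpa]

lemma innerFold_contains (cs : List Int) (c : Int × Int × Int × Int) (i j : Int) (d : PySem.Dict Int Int) :
    (cs.foldl (fun d ly => if c.2.1 ≤ ly ∧ ly ≤ c.2.1 + c.2.2.2 then d.modify i 0 (· + 1) else d) d).contains j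
      = (d.contains j || (decide (j = i) && decide (pvK cs c ≠ 0))) := by
  unfold pvK
  induction cs generalizing d with
  | nil => simp
  | cons a t ih =>
    simp only [List.foldl_cons, List.countP_cons]
    by_cases hpa : c.2.1 ≤ a ∧ a ≤ c.2.1 + c.2.2.2
    · rw [if_pos hpa, ih, PySem.Dict.contains_modify]
      by_cases hj : j = i
      · simp [hj, hpa]
      · simp [hj]
    · rw [if_neg hpa, ih]
      simp [hpa]

-- a Python dict looked up with default 1, through contains and the 0-default value
lemma getD_one (d : PySem.Dict Int Int) (k : Int) :
    d.getD k 1 = if d.contains k = true then d.getD k 0 else 1 := by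
  cases h : d.get? k with
  | none =>
    have hc := (PySem.Dict.get?_eq_none_iff_contains d k).mp h
    rw [if_neg (by simp [hc]), PySem.Dict.getD_of_get?_eq_none d 1 h]
  | some v =>
    have hc : d.contains k = true := by
      by_contra hcf
      simp only [Bool.not_eq_true] at hcf
      rw [← PySem.Dict.get?_eq_none_iff_contains] at hcf
      simp [h] at hcf
    rw [if_pos hc, PySem.Dict.getD_of_get?_eq_some d 1 h, PySem.Dict.getD_of_get?_eq_some d 0 h]

-- keys below the enumeration start are untouched by A's dict-building loop
lemma outer_preserve (cs : List Int) : ∀ (cells : List (Int × Int × Int × Int)) (s : Nat) (d : PySem.Dict Int Int) (j : Int), j < (s : Int) →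
    (((PySem.List.enumerate cells (s : Int)).foldl (fun d p =>
        cs.foldl (fun d ly => if p.2.2.1 ≤ ly ∧ ly ≤ p.2.2.1 + p.2.2.2.2 then d.modify p.1 0 (· + 1) else d) d) d).contains j
        = d.contains j ∧
     ((PySem.List.enumerate cells (s : Int)).foldl (fun d p =>
        cs.foldl (fun d ly => if p.2.2.1 ≤ ly ∧ ly ≤ p.2.2.1 + p.2.2.2.2 then d.modify p.1 0 (· + 1) else d) d) d).getD j 0
        = d.getD j 0) := by
  intro cells
  induction cells with
  | nil =>
    intro s d j hj
    simp [PySem.List.enumerate]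
  | cons c rest ih =>
    intro s d j hj
    have hcons : PySem.List.enumerate (c :: rest) (s : Int) = ((s : Int), c) :: PySem.List.enumerate rest ((s : Int) + 1) := by
      simp [PySem.List.enumerate]
    rw [hcons]
    simp only [List.foldl_cons]
    have hs1 : ((s : Int) + 1) = ((s + 1 : Nat) : Int) := by push_cast; ring
    rw [hs1]
    obtain ⟨h1, h2⟩ := ih (s + 1) _ j (by push_cast at hj ⊢; omega)
    refine ⟨?_, ?_⟩
    · rw [h1]
      rw [innerFold_contains]
      simp [show ¬(j = (s : Int)) by omega]
    · rw [h2]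
      rw [innerFold_getD, if_neg (by omega : ¬ j = (s : Int))]

-- the built dict, looked up with default 1 at a cell's index
lemma outer_dict (cs : List Int) : ∀ (cells : List (Int × Int × Int × Int)) (s : Nat) (d : PySem.Dict Int Int),
    (∀ j : Nat, s ≤ j → d.contains (j : Int) = false) →
    ∀ t (ht : t < cells.length),
      ((PySem.List.enumerate cells (s : Int)).foldl (fun d p =>
          cs.foldl (fun d ly => if p.2.2.1 ≤ ly ∧ ly ≤ p.2.2.1 + p.2.2.2.2 then d.modify p.1 0 (· + 1) else d) d) d).getD ((s + t : Nat) : Int) 1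
        = (if pvK cs cells[t] = 0 then 1 else (pvK cs cells[t] : Int)) := by
  intro cells
  induction cells with
  | nil => intro s d hd t ht; simp at ht
  | cons c rest ih =>
    intro s d hd t ht
    have hcons : PySem.List.enumerate (c :: rest) (s : Int) = ((s : Int), c) :: PySem.List.enumerate rest ((s : Int) + 1) := by
      simp [PySem.List.enumerate]
    rw [hcons]
    simp only [List.foldl_cons]
    have hs1 : ((s : Int) + 1) = ((s + 1 : Nat) : Int) := by push_cast; ring
    rw [hs1]
    cases t with
    | zero =>
      have hk : ((s + 0 : Nat) : Int) = (s : Int) := by push_cast; ring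
      rw [hk]
      obtain ⟨h1, h2⟩ := outer_preserve cs rest (s + 1) _ (s : Int) (by push_cast; omega)
      rw [getD_one, h1, h2]
      rw [innerFold_contains, innerFold_getD]
      have hcd : d.contains (s : Int) = false := hd s (le_refl s)
      have hgd : d.getD (s : Int) 0 = 0 := PySem.Dict.getD_of_not_contains d 0 hcd
      simp only [hcd, hgd, List.getElem_cons_zero, Bool.false_or, decide_true,
        Bool.true_and, zero_add]
      by_cases hK : pvK cs c = 0 <;> simp [hK]
    | succ t' =>
      have hk : ((s + (t' + 1) : Nat) : Int) = (((s + 1) + t' : Nat) : Int) := by push_cast; ring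
      rw [hk]
      have hd' : ∀ j : Nat, s + 1 ≤ j →
          ((fun d (p : Int × (Int × Int × Int × Int)) =>
            cs.foldl (fun d ly => if p.2.2.1 ≤ ly ∧ ly ≤ p.2.2.1 + p.2.2.2.2 then d.modify p.1 0 (· + 1) else d) d) d ((s : Int), c)).contains (j : Int) = false := by
        intro j hj
        rw [innerFold_contains]
        simp [hd j (by omega), show ¬((j : Int) = (s : Int)) by omega]
      have := ih (s + 1) _ hd' t' (by simpa using ht)
      simpa using this

-- ---- A's annotation loop ----
def annotRows {β : Type} (G : Int → β) : List (List (Int × Int × Int × Int)) → Int → List (List β)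
  | [], _ => []
  | r :: rest, i0 => (List.range r.length).map (fun t : Nat => G (i0 + (t : Int))) :: annotRows G rest (i0 + r.length)

lemma innerLoop {β : Type} (G : Int → β) (row : List (Int × Int × Int × Int)) (acc : List β) (i0 : Int) :
    row.foldl (fun st (_ : Int × Int × Int × Int) => (st.1 ++ [G st.2], st.2 + 1)) (acc, i0)
      = (acc ++ (List.range row.length).map (fun t : Nat => G (i0 + (t : Int))), i0 + row.length) := by
  induction row generalizing acc i0 with
  | nil => simp
  | cons _ r ih =>
    simp only [List.foldl_cons]
    rw [ih]
    simp only [List.length_cons]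
    rw [List.range_succ_eq_map]
    simp only [List.map_cons, List.map_map, Prod.mk.injEq, Nat.cast_zero,
      add_zero, List.append_assoc, List.singleton_append]
    refine ⟨?_, by push_cast; ring⟩
    congr 1
    congr 1
    apply List.map_congr_left
    intro t _
    simp only [Function.comp_apply]
    congr 1
    push_cast
    ring

lemma outerLoop {β : Type} (G : Int → β) (rs : List (List (Int × Int × Int × Int))) (acc : List (List β)) (i0 : Int) :
    rs.foldl (fun st row =>
        (st.1 ++ [(row.foldl (fun st2 (_ : Int × Int × Int × Int) => (st2.1 ++ [G st2.2], st2.2 + 1)) ([], st.2)).1],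
         (row.foldl (fun st2 (_ : Int × Int × Int × Int) => (st2.1 ++ [G st2.2], st2.2 + 1)) ([], st.2)).2)) (acc, i0)
      = (acc ++ annotRows G rs i0, i0 + rs.flatten.length) := by
  induction rs generalizing acc i0 with
  | nil => simp [annotRows]
  | cons r rest ih =>
    simp only [List.foldl_cons]
    rw [innerLoop]
    dsimp only
    rw [ih]
    simp only [annotRows, List.flatten_cons, List.length_append, List.nil_append, Prod.mk.injEq]
    exact ⟨by simp, by push_cast; ring⟩

lemma annotRows_eq {β : Type} (G : Int → β) (F : (Int × Int × Int × Int) → β) :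
    ∀ (rs : List (List (Int × Int × Int × Int))) (i0 : Nat),
    (∀ t : Nat, t < rs.flatten.length → G ((i0 + t : Nat) : Int) = F (rs.flatten.getD t (0,0,0,0))) →
    annotRows G rs (i0 : Nat) = rs.map (fun r => r.map F) := by
  intro rs
  induction rs with
  | nil => intro i0 _; simp [annotRows]
  | cons r rest ih =>
    intro i0 hG
    simp only [annotRows, List.map_cons, List.cons.injEq]
    constructor
    · apply List.ext_getElem (by simp)
      intro n h1 h2
      have hn : n < r.length := by simpa using h2
      simp only [List.getElem_map, List.getElem_range]
      have hGn := hG n (by simp only [List.flatten_cons, List.length_append]; omega)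
      have hidx : ((i0 : Int) + (n : Int)) = ((i0 + n : Nat) : Int) := by push_cast; ring
      rw [hidx, hGn]
      congr 1
      rw [List.flatten_cons, List.getD_append _ _ _ _ hn, List.getD_eq_getElem r _ hn]
    · have hcast : (i0 : Int) + (r.length : Int) = ((i0 + r.length : Nat) : Int) := by push_cast; ring
      rw [hcast]
      apply ih (i0 + r.length)
      intro t ht
      have hGt := hG (r.length + t) (by simp only [List.flatten_cons, List.length_append]; omega)
      have hidx : (i0 + r.length) + t = i0 + (r.length + t) := by omega
      rw [hidx, hGt]
      congr 1
      rw [List.flatten_cons, List.getD_append_right _ _ _ _ (by omega)]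
      congr 1
      omega

-- ---- the two sides ----
-- the per-index value A's annotation loop appends
def pvG (rows : List (List (Int × Int × Int × Int))) : Int → ((Int × Int × Int × Int) × Int) :=
  fun i => (PySem.List.pyGetD rows.flatten i (0, 0, 0, 0), (detect_vertical_merges rows).getD i 1)

lemma A_eq (rows : List (List (Int × Int × Int × Int))) :
    annotate_cells_with_merge_info rows = rows.map (fun r => r.map (pvF (pvCenters rows))) := by
  simp only [annotate_cells_with_merge_info, PySem.List.foldl_append_eq_flatten, List.nil_append]
  have h := outerLoop (pvG rows) rows [] 0
  simp only [pvG] at h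
  rw [h]
  simp only [List.nil_append]
  rw [show (0 : Int) = ((0 : Nat) : Int) by simp]
  apply annotRows_eq
  intro t ht
  simp only [pvG, detect_vertical_merges, PySem.List.foldl_append_eq_flatten, List.nil_append]
  have hd := outer_dict (pvCenters rows) rows.flatten 0 PySem.Dict.empty
    (fun j _ => by simp [PySem.Dict.contains_empty]) t ht
  rw [Nat.cast_zero] at hd
  simp only [pvCenters] at hd
  rw [hd, PySem.List.pyGetD_natCast]
  simp only [pvF]
  simp only [Nat.zero_add] at ht ⊢
  rw [List.getD_eq_getElem _ _ ht]
  simp only [pvCenters]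

lemma B_eq (rows : List (List (Int × Int × Int × Int))) :
    annotate_cells_with_merge_info_alt rows = rows.map (fun r => r.map (pvF (pvCenters rows))) := by
  simp only [annotate_cells_with_merge_info_alt, PySem.List.foldl_append_singleton_eq_map,
    List.nil_append]
  apply List.map_congr_left
  intro row _
  apply List.map_congr_left
  intro c _
  -- per cell: the two binary searches count the centers in [y, y + h]
  have hs : (PySem.List.sorted (pvCenters rows) (fun v => v)).Pairwise (· ≤ ·) := by
    have := PySem.List.sorted_pairwise (pvCenters rows) (fun v => v)
    simpa using this
  have hlo := pvBisect_countP (PySem.List.sorted (pvCenters rows) (fun v => v))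
    (fun v => decide (v < c.2.1)) hs
    (by intro v w hvw h2; simp only [decide_eq_true_eq] at *; omega)
  have hhi := pvBisect_countP (PySem.List.sorted (pvCenters rows) (fun v => v))
    (fun v => decide (v ≤ c.2.1 + c.2.2.2)) hs
    (by intro v w hvw h2; simp only [decide_eq_true_eq] at *; omega)
  have hperm := PySem.List.sorted_perm (pvCenters rows) (fun v => v) false
  rw [hperm.countP_eq] at hlo hhi
  simp only [pvCenters] at hlo hhi
  rw [hlo, hhi]
  simp only [pvF, pvK, pvCenters, Prod.mk.injEq]
  refine ⟨trivial, ?_⟩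
  set CS := (rows.filter (fun row => !row.isEmpty)).map (fun row =>
    PySem.Int.floordiv
      (((PySem.List.min? (row.map (fun c => c.2.1)) (fun v => v)).getD 0) +
       ((PySem.List.max? (row.map (fun c => c.2.1 + c.2.2.2)) (fun v => v)).getD 0)) 2) with hCS
  by_cases hy : c.2.1 ≤ c.2.1 + c.2.2.2
  · have hsplit := counts_split CS c.2.1 (c.2.1 + c.2.2.2) hy
    split_ifs <;> omega
  · have hk0 : CS.countP (fun ly => decide (c.2.1 ≤ ly ∧ ly ≤ c.2.1 + c.2.2.2)) = 0 := by
      rw [List.countP_eq_zero]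
      intro a _
      simp only [decide_eq_true_eq]
      omega
    have hmono : CS.countP (fun ly => decide (ly ≤ c.2.1 + c.2.2.2)) ≤ CS.countP (fun ly => decide (ly < c.2.1)) := by
      apply List.countP_mono_left
      intro x _ hx
      simp only [decide_eq_true_eq] at *
      omega
    split_ifs <;> omega

-- ===== VERDICT (by name: the statement is the Claim_ definition above) =====
theorem annotate_cells_with_merge_info_spec : Claim_equal_annotate_cells_with_merge_info := by
  intro rows _
  unfold Spec_annotate_cells_with_merge_info
  rw [A_eq, B_eq]
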